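-- pv_equiv track=rewrite | github.com/locharp/code-snippets | Coding Ninjas/Coding World Cup 2023/Easy/Day 38: AUS vs BAN: Man of the Match.py | happyPlayers
-- ===== SOURCE A (Python) =====
-- from typing import List
--
-- def happyPlayers( balls : List[int] ) -> int:
--
--     c = set()
--     d = set()
--
--     for ball in balls:
--         if ball in c:
--             d.add( ball )
--         else:
--             c.add( ball )
--
--     if len( d ) > 0:
--         return max( d )
--     else:
--         return -1
-- ===== SOURCE B (Python) =====
-- from typing import List
--
-- def happyPlayers(balls: List[int]) -> int:
--     # Sort descending; the first adjacent equal pair is the largest duplicated value.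
--     s = sorted(balls, reverse=True)
--     for x, y in zip(s, s[1:]):
--         if x == y:
--             return x
--     return -1
-- ===== Notes on version B (the rewrite author's own statement) =====
-- stated objective: alternative
-- what changed: Replaces A's one-pass seen/duplicate set tracking by sort-then-scan: sort descending and return the first adjacent equal pair (the largest duplicated value), -1 if none.
import Mathlib
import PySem

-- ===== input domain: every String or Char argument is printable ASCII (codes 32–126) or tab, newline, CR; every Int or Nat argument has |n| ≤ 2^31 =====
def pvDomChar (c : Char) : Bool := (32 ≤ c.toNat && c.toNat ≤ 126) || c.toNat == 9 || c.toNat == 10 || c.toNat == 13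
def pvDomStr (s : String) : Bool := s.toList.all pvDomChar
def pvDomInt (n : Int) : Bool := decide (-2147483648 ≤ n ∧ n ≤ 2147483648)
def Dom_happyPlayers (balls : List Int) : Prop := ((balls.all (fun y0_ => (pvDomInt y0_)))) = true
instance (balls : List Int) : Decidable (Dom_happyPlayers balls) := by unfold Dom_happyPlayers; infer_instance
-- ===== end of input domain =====

-- B replaces A's one-pass seen/duplicate set tracking by sort-then-scan: sort descending, first adjacent equal pair (alternative algorithm, not faster).

-- ===== PORT A =====
-- the loop body: if ball in c: d.add(ball) else: c.add(ball)
def happyStep (cd : PySem.Set Int × PySem.Set Int) (ball : Int) : PySem.Set Int × PySem.Set Int :=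
  if PySem.Set.contains cd.1 ball then (cd.1, PySem.Set.add cd.2 ball)
  else (PySem.Set.add cd.1 ball, cd.2)

def happyPlayers (balls : List Int) : Int :=
  let cd := balls.foldl happyStep (PySem.Set.empty, PySem.Set.empty)
  if 0 < PySem.Set.len cd.2 then (PySem.List.max? cd.2 (fun x => x)).getD (-1) else -1

-- ===== PORT B =====
-- the 'for x, y in zip(s, s[1:])' loop: scan adjacent pairs, return on the first equal one
def firstAdjDup : List Int → Int
  | x :: y :: t => if x == y then x else firstAdjDup (y :: t)
  | _ => -1

def happyPlayers_alt (balls : List Int) : Int :=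
  firstAdjDup (PySem.List.sorted balls (fun x => x) true)

-- ===== PRECONDITION & SPEC =====
def Spec_happyPlayers (balls : List Int) (out : Int) : Prop := out = happyPlayers_alt balls
instance (balls : List Int) (out : Int) : Decidable (Spec_happyPlayers balls out) := by unfold Spec_happyPlayers; infer_instance

-- ===== CLAIM (what is proved, stated in full; the proofs are below) =====
def Claim_equal_happyPlayers : Prop := ∀ (balls : List Int), Dom_happyPlayers balls → Spec_happyPlayers balls (happyPlayers balls)

-- ===== LEMMAS AND PROOFS =====

-- loop invariant of A: after processing prefix p, c has the members of p and d the values counted ≥ 2 in p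
theorem happy_loop (bs : List Int) (p : List Int) (c d : PySem.Set Int)
    (hc : ∀ x, x ∈ c ↔ x ∈ p) (hd : ∀ x, x ∈ d ↔ 2 ≤ p.count x) :
    ∀ x, x ∈ (List.foldl happyStep (c, d) bs).2 ↔ 2 ≤ (p ++ bs).count x := by
  induction bs generalizing p c d with
  | nil => intro x; simpa using hd x
  | cons b t ih =>
    intro x
    have hcount : ∀ y : Int, (p ++ b :: t).count y = ((p ++ [b]) ++ t).count y := by
      intro y; simp
    rw [hcount x, List.foldl_cons]
    by_cases hb : b ∈ c
    · have hstep : happyStep (c, d) b = (c, PySem.Set.add d b) := by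
        simp [happyStep, hb]
      rw [hstep]
      have hbp : b ∈ p := (hc b).1 hb
      refine ih (p ++ [b]) c (PySem.Set.add d b) (fun y => ?_) (fun y => ?_) x
      · rw [hc y]
        constructor
        · intro h; exact List.mem_append_left _ h
        · intro h
          rcases List.mem_append.1 h with h | h
          · exact h
          · simp at h; exact h ▸ hbp
      · rw [PySem.Set.mem_add]
        by_cases hy : y = b
        · subst hy
          have h1 : 1 ≤ p.count y := List.count_pos_iff.2 hbp
          simp [List.count_append]
          omega
        · simp [List.count_append, hy, hd y, Ne.symm hy]
    · have hstep : happyStep (c, d) b = (PySem.Set.add c b, d) := by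
        simp [happyStep, hb]
      rw [hstep]
      have hbp : b ∉ p := fun h => hb ((hc b).2 h)
      refine ih (p ++ [b]) (PySem.Set.add c b) d (fun y => ?_) (fun y => ?_) x
      · rw [PySem.Set.mem_add, hc y]
        constructor
        · intro h
          rcases h with h | h
          · exact List.mem_append_left _ h
          · simp [h]
        · intro h
          rcases List.mem_append.1 h with h | h
          · exact Or.inl h
          · simp at h; exact Or.inr h
      · by_cases hy : y = b
        · subst hy
          have h0 : p.count y = 0 := List.count_eq_zero.2 hbp
          simp [List.count_append, hd y, h0]
        · simp [List.count_append, hd y, Ne.symm hy]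

-- d (A's duplicate set) has exactly the values counted ≥ 2
theorem mem_d_iff (balls : List Int) (x : Int) :
    x ∈ (List.foldl happyStep (PySem.Set.empty, PySem.Set.empty) balls).2 ↔ 2 ≤ balls.count x := by
  have := happy_loop balls [] PySem.Set.empty PySem.Set.empty
    (fun y => by simp [PySem.Set.empty]) (fun y => by simp [PySem.Set.empty]) x
  simpa using this

-- on a descending-sorted list, the first adjacent equal pair is a duplicate that dominates every duplicate
theorem firstAdjDup_max (s : List Int) (hs : s.Pairwise (fun a b => b ≤ a)) :
    ∀ x, 2 ≤ s.count x → x ≤ firstAdjDup s ∧ 2 ≤ s.count (firstAdjDup s) := by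
  induction s with
  | nil => intro x hx; simp at hx
  | cons a t ih =>
    cases t with
    | nil =>
      intro x hx
      have h1 : List.count x [a] ≤ 1 := by
        rw [List.count_cons]
        split <;> simp
      omega
    | cons b t' =>
      intro x hx
      rcases List.pairwise_cons.1 hs with ⟨ha, hs'⟩
      by_cases hab : a = b
      · subst hab
        have hcnt : 2 ≤ (a :: a :: t').count a := by
          simp
        have hxle : x ≤ a := by
          have hmem : x ∈ a :: a :: t' := List.count_pos_iff.1 (by omega)
          rcases List.mem_cons.1 hmem with h | hmem2
          · exact h.le
          · exact ha x hmem2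
        have hres : firstAdjDup (a :: a :: t') = a := by simp [firstAdjDup]
        rw [hres]
        exact ⟨hxle, hcnt⟩
      · -- a appears exactly once: a ∉ b :: t'
        have hanot : a ∉ b :: t' := by
          intro hmem
          rcases List.mem_cons.1 hmem with h | hmem2
          · exact hab h
          · have h1 : a ≤ b := (List.pairwise_cons.1 hs').1 a hmem2
            have h2 : b ≤ a := ha b (by simp)
            exact hab (le_antisymm h1 h2)
        have hx' : 2 ≤ (b :: t').count x := by
          rw [List.count_cons] at hx
          split at hx
          · rename_i hxe
            have hxaeq : x = a := (beq_iff_eq.mp hxe).symm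
            subst hxaeq
            have h0 : List.count x (b :: t') = 0 := List.count_eq_zero.2 hanot
            omega
          · omega
        obtain ⟨hle, hcnt⟩ := ih hs' x hx'
        have hres : firstAdjDup (a :: b :: t') = firstAdjDup (b :: t') := by
          simp [firstAdjDup, hab]
        rw [hres]
        refine ⟨hle, ?_⟩
        rw [List.count_cons]
        split <;> omega

-- with no duplicate, the scan falls through to -1
theorem firstAdjDup_nodup (s : List Int) (h : ∀ x, s.count x ≤ 1) : firstAdjDup s = -1 := by
  induction s with
  | nil => rfl
  | cons a t ih =>
    cases t with
    | nil => rfl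
    | cons b t' =>
      by_cases hab : a = b
      · subst hab
        have := h a
        simp at this
      · have hres : firstAdjDup (a :: b :: t') = firstAdjDup (b :: t') := by
          simp [firstAdjDup, hab]
        rw [hres]
        refine ih (fun x => ?_)
        have hx := h x
        rw [List.count_cons] at hx
        split at hx <;> omega

-- ===== VERDICT (by name: the statement is the Claim_ definition above) =====
theorem happyPlayers_spec : Claim_equal_happyPlayers := by
  intro balls _
  unfold Spec_happyPlayers happyPlayers happyPlayers_alt
  show (if 0 < PySem.Set.len (List.foldl happyStep (PySem.Set.empty, PySem.Set.empty) balls).2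
        then (PySem.List.max? (List.foldl happyStep (PySem.Set.empty, PySem.Set.empty) balls).2 (fun x => x)).getD (-1)
        else -1)
      = firstAdjDup (PySem.List.sorted balls (fun x => x) true)
  set s := PySem.List.sorted balls (fun x => x) true with hsdef
  set d := (List.foldl happyStep (PySem.Set.empty, PySem.Set.empty) balls).2 with hddef
  have hperm : s.Perm balls := PySem.List.sorted_perm balls (fun x => x) true
  have hcount : ∀ x : Int, s.count x = balls.count x := fun x => hperm.count_eq x
  have hpair : s.Pairwise (fun a b : Int => b ≤ a) := by
    simpa using PySem.List.sorted_pairwise_rev balls (fun x => x)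
  by_cases hdup : ∃ z : Int, 2 ≤ balls.count z
  · obtain ⟨z, hz⟩ := hdup
    have hzmem : z ∈ d := (mem_d_iff balls z).2 hz
    have hdne : d ≠ [] := fun h => by rw [h] at hzmem; simp at hzmem
    have hlen : 0 < PySem.Set.len d := by
      cases hd : d with
      | nil => exact absurd hd hdne
      | cons a t => simp [PySem.Set.len]
    rw [if_pos hlen]
    obtain ⟨m, hm⟩ : ∃ m, PySem.List.max? d (fun x => x) = some m := by
      cases h : PySem.List.max? d (fun x => x) with
      | none => exact absurd ((PySem.List.max?_eq_none_iff d _).1 h) hdne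
      | some m => exact ⟨m, rfl⟩
    rw [hm]
    have hmd : 2 ≤ balls.count m := (mem_d_iff balls m).1 (PySem.List.max?_mem hm)
    obtain ⟨hmle, hfcnt⟩ := firstAdjDup_max s hpair m (by rw [hcount]; exact hmd)
    have hfd : firstAdjDup s ∈ d := (mem_d_iff balls _).2 (by rw [← hcount]; exact hfcnt)
    have hfle : firstAdjDup s ≤ m := by
      simpa using PySem.List.max?_isMax hm (firstAdjDup s) hfd
    simpa using le_antisymm hmle hfle
  · simp only [not_exists, not_le] at hdup
    have hdnil : d = [] := by
      rw [List.eq_nil_iff_forall_not_mem]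
      intro x hx
      have h1 := (mem_d_iff balls x).1 hx
      have h2 := hdup x
      omega
    have hf : firstAdjDup s = -1 :=
      firstAdjDup_nodup s (fun x => by rw [hcount]; have := hdup x; omega)
    rw [hdnil, hf]
    simp [PySem.Set.len]
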